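-- pv_equiv track=rewrite | github.com/vita-epfl/causalmotion | style/utils.py | set_domain_shift
-- ===== SOURCE A (Python) =====
-- def set_domain_shift(domain_shifts, env_name):
--     """
--     Set the domain shift
--     """
--     domain_shifts = [int(i) for i in domain_shifts.split('-')]
--     if len(domain_shifts) == 5:
--         if env_name == 'hotel' or 'env1' in env_name:
--             alpha_e = domain_shifts[0]
--         elif env_name == 'univ' or 'env2' in env_name:
--             alpha_e = domain_shifts[1]
--         elif env_name == 'zara1' or 'env3' in env_name:
--             alpha_e = domain_shifts[2]
--         elif env_name == 'zara2' or 'env4' in env_name: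
--             alpha_e = domain_shifts[3]
--         elif env_name == 'eth' or 'env5' in env_name:
--             alpha_e = domain_shifts[4]
--         else:
--             raise ValueError('Unkown Environment!')
--     elif len(domain_shifts) == 1:
--         alpha_e = domain_shifts[0]
--     else:
--         raise ValueError('Express a domain_shift for each of the 5 enviroment or 1 for all.')
--     return alpha_e
-- ===== SOURCE B (Python) =====
-- def set_domain_shift(domain_shifts, env_name):
--     """
--     Set the domain shift
--     """
--     alphas = [int(i) for i in domain_shifts.split('-')]
--     if len(alphas) == 1:
--         return alphas[0]
--     if len(alphas) != 5:
--         raise ValueError('Express a domain_shift for each of the 5 enviroment or 1 for all.')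
--     # collect every matching environment index, then take the highest-priority (lowest) one
--     exact_index = {'hotel': 0, 'univ': 1, 'zara1': 2, 'zara2': 3, 'eth': 4}
--     hits = [k for k in range(5) if 'env%d' % (k + 1) in env_name]
--     if env_name in exact_index:
--         hits.append(exact_index[env_name])
--     if not hits:
--         raise ValueError('Unkown Environment!')
--     return alphas[min(hits)]
-- ===== Notes on version B (the rewrite author's own statement) =====
-- stated objective: alternative
-- what changed: Replaces A's first-match if/elif cascade by a collect-then-select pass: B gathers all matching environment indices (substring hits from one range scan plus a dict lookup for the exact names) and indexes the alphas at the minimum hit, which coincides with A's first match because A's checks are ordered by index.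
import Mathlib
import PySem

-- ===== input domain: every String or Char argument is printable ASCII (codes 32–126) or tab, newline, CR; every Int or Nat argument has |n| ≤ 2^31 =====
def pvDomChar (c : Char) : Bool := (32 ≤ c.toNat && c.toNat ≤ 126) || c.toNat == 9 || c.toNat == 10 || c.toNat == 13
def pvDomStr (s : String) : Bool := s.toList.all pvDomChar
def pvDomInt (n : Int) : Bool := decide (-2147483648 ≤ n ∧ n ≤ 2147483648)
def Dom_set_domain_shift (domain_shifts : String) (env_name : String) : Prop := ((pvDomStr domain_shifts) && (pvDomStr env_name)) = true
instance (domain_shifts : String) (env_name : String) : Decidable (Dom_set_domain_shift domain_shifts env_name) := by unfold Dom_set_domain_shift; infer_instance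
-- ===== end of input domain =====

-- B replaces A's first-match if/elif cascade by a collect-then-select pass: it gathers
-- every matching environment index (substring hits plus a dict lookup for the exact
-- names) and returns the alpha at the minimum (= highest-priority) index (objective:
-- alternative). Both Pythons raise ValueError where Pre_ is false; the ports return 0 there.

-- ===== PORT A =====
def set_domain_shift (domain_shifts : String) (env_name : String) : Int :=
  let ds : List Int :=
    (PySem.Chars.splitOn domain_shifts.toList "-".toList).map (fun i => (PySem.Int.ofChars? i).getD 0)
  if ds.length = 5 then
    if env_name = "hotel" || PySem.Str.isIn "env1" env_name then PySem.List.pyGetD ds 0 0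
    else if env_name = "univ" || PySem.Str.isIn "env2" env_name then PySem.List.pyGetD ds 1 0
    else if env_name = "zara1" || PySem.Str.isIn "env3" env_name then PySem.List.pyGetD ds 2 0
    else if env_name = "zara2" || PySem.Str.isIn "env4" env_name then PySem.List.pyGetD ds 3 0
    else if env_name = "eth" || PySem.Str.isIn "env5" env_name then PySem.List.pyGetD ds 4 0
    else 0  -- raise ValueError('Unkown Environment!')  (outside Pre_)
  else if ds.length = 1 then PySem.List.pyGetD ds 0 0
  else 0    -- raise ValueError('Express a domain_shift …')  (outside Pre_)

-- ===== PORT B =====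
def set_domain_shift_alt (domain_shifts : String) (env_name : String) : Int :=
  let alphas : List Int :=
    (PySem.Chars.splitOn domain_shifts.toList "-".toList).map (fun i => (PySem.Int.ofChars? i).getD 0)
  if alphas.length = 1 then PySem.List.pyGetD alphas 0 0
  else if alphas.length ≠ 5 then 0  -- raise ValueError('Express a domain_shift …')  (outside Pre_)
  else
    let exactIndex : PySem.Dict String Int :=
      PySem.Dict.ofList [("hotel", 0), ("univ", 1), ("zara1", 2), ("zara2", 3), ("eth", 4)]
    -- hits = [k for k in range(5) if 'env%d' % (k+1) in env_name]
    let hits : List Int := (PySem.List.pyRange 0 5 1).filter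
      (fun k => PySem.Str.isIn ("env" ++ PySem.Int.toStr (k + 1)) env_name)
    let hits : List Int :=
      match PySem.Dict.get? exactIndex env_name with
      | some i => hits ++ [i]   -- if env_name in exact_index: hits.append(...)
      | none => hits
    match hits with
    | [] => 0                   -- raise ValueError('Unkown Environment!')  (outside Pre_)
    | h :: t => PySem.List.pyGetD alphas (t.foldl min h) 0   -- alphas[min(hits)]

-- ===== PRECONDITION & SPEC =====
-- exactly the inputs where the Python A returns: every token parses as int, and the
-- token count is 1, or 5 with env_name matching one of the five environments
def Pre_set_domain_shift (domain_shifts : String) (env_name : String) : Prop :=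
  (∀ p ∈ PySem.Chars.splitOn domain_shifts.toList "-".toList, (PySem.Int.ofChars? p).isSome = true) ∧
  ((PySem.Chars.splitOn domain_shifts.toList "-".toList).length = 1 ∨
   ((PySem.Chars.splitOn domain_shifts.toList "-".toList).length = 5 ∧
    (env_name = "hotel" ∨ PySem.Str.isIn "env1" env_name = true ∨
     env_name = "univ" ∨ PySem.Str.isIn "env2" env_name = true ∨
     env_name = "zara1" ∨ PySem.Str.isIn "env3" env_name = true ∨
     env_name = "zara2" ∨ PySem.Str.isIn "env4" env_name = true ∨
     env_name = "eth" ∨ PySem.Str.isIn "env5" env_name = true)))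
instance (domain_shifts : String) (env_name : String) : Decidable (Pre_set_domain_shift domain_shifts env_name) := by
  unfold Pre_set_domain_shift; infer_instance

def pvWitness_set_domain_shift : String × String := ("1-2-3-4-5", "hotel")

def Spec_set_domain_shift (domain_shifts : String) (env_name : String) (out : Int) : Prop := out = set_domain_shift_alt domain_shifts env_name
instance (domain_shifts : String) (env_name : String) (out : Int) : Decidable (Spec_set_domain_shift domain_shifts env_name out) := by unfold Spec_set_domain_shift; infer_instance

-- ===== CLAIM (what is proved, stated in full; the proofs are below) =====
def Claim_equal_set_domain_shift : Prop := ∀ (domain_shifts : String) (env_name : String), Dom_set_domain_shift domain_shifts env_name → Pre_set_domain_shift domain_shifts env_name → Spec_set_domain_shift domain_shifts env_name (set_domain_shift domain_shifts env_name)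

-- ===== LEMMAS AND PROOFS =====

-- the length-5 dispatch: A's first-match cascade equals B's min-of-all-hits selection
set_option maxHeartbeats 4000000 in
theorem pv_dispatch (env : String) (a b c d e : Int) :
    (if env = "hotel" || PySem.Str.isIn "env1" env then a
     else if env = "univ" || PySem.Str.isIn "env2" env then b
     else if env = "zara1" || PySem.Str.isIn "env3" env then c
     else if env = "zara2" || PySem.Str.isIn "env4" env then d
     else if env = "eth" || PySem.Str.isIn "env5" env then e
     else 0) =
    (let exactIndex : PySem.Dict String Int :=
      PySem.Dict.ofList [("hotel", 0), ("univ", 1), ("zara1", 2), ("zara2", 3), ("eth", 4)]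
     let hits : List Int := (PySem.List.pyRange 0 5 1).filter
       (fun k => PySem.Str.isIn ("env" ++ PySem.Int.toStr (k + 1)) env)
     let hits : List Int :=
       match PySem.Dict.get? exactIndex env with
       | some i => hits ++ [i]
       | none => hits
     match hits with
     | [] => 0
     | h :: t => PySem.List.pyGetD [a, b, c, d, e] (t.foldl min h) 0) := by
  by_cases h1 : env = "hotel"
  · subst h1; rfl
  by_cases h2 : env = "univ"
  · subst h2; rfl
  by_cases h3 : env = "zara1"
  · subst h3; rfl
  by_cases h4 : env = "zara2"
  · subst h4; rfl
  by_cases h5 : env = "eth"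
  · subst h5; rfl
  have h1' : "hotel" ≠ env := Ne.symm h1
  have h2' : "univ" ≠ env := Ne.symm h2
  have h3' : "zara1" ≠ env := Ne.symm h3
  have h4' : "zara2" ≠ env := Ne.symm h4
  have h5' : "eth" ≠ env := Ne.symm h5
  have hd : (PySem.Dict.ofList [("hotel",(0:Int)),("univ",1),("zara1",2),("zara2",3),("eth",4)]) = PySem.Dict.mk [("hotel",0),("univ",1),("zara1",2),("zara2",3),("eth",4)] := by decide
  have hr : PySem.List.pyRange 0 5 1 = [0,1,2,3,4] := by decide
  have t1 : PySem.Int.toChars 1 = ['1'] := by decide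
  have t2 : PySem.Int.toChars 2 = ['2'] := by decide
  have t3 : PySem.Int.toChars 3 = ['3'] := by decide
  have t4 : PySem.Int.toChars 4 = ['4'] := by decide
  have t5 : PySem.Int.toChars 5 = ['5'] := by decide
  simp only [hd, hr]
  by_cases s1 : PySem.Str.isIn "env1" env = true <;>
  by_cases s2 : PySem.Str.isIn "env2" env = true <;>
  by_cases s3 : PySem.Str.isIn "env3" env = true <;>
  by_cases s4 : PySem.Str.isIn "env4" env = true <;>
  by_cases s5 : PySem.Str.isIn "env5" env = true <;>
  simp_all [List.filter, PySem.List.pyGetD, PySem.List.pyGet?, PySem.List.pyIdx?,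
            List.foldl, PySem.Dict.get?]

theorem set_domain_shift_eq_alt (domain_shifts env_name : String)
    (hpre : Pre_set_domain_shift domain_shifts env_name) :
    set_domain_shift domain_shifts env_name = set_domain_shift_alt domain_shifts env_name := by
  obtain ⟨-, hlen⟩ := hpre
  have h : ((PySem.Chars.splitOn domain_shifts.toList "-".toList).map
      (fun i => (PySem.Int.ofChars? i).getD 0)).length = 1 ∨
      ((PySem.Chars.splitOn domain_shifts.toList "-".toList).map
      (fun i => (PySem.Int.ofChars? i).getD 0)).length = 5 := by
    rcases hlen with h1 | ⟨h5, -⟩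
    · left; simpa using h1
    · right; simpa using h5
  unfold set_domain_shift set_domain_shift_alt
  generalize (PySem.Chars.splitOn domain_shifts.toList "-".toList).map
      (fun i => (PySem.Int.ofChars? i).getD 0) = l at h ⊢
  rcases l with _ | ⟨a, _ | ⟨b, _ | ⟨c, _ | ⟨d, _ | ⟨e, _ | ⟨f, t⟩⟩⟩⟩⟩⟩
  · simp at h
  · simp [PySem.List.pyGetD, PySem.List.pyGet?, PySem.List.pyIdx?]
  · simp at h
  · simp at h
  · simp at h
  · simpa [PySem.List.pyGetD, PySem.List.pyGet?, PySem.List.pyIdx?] using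
      pv_dispatch env_name a b c d e
  · rcases h with h | h <;> simp at h

-- ===== VERDICT (by name: the statement is the Claim_ definition above) =====
theorem set_domain_shift_spec : Claim_equal_set_domain_shift := by
  intro ds en _ hpre
  unfold Spec_set_domain_shift
  exact set_domain_shift_eq_alt ds en hpre
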